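-- pv_equiv track=rewrite | github.com/pypi-data/pypi-mirror-368 | packages/rf-mcp/rf_mcp-0.1.0.dev10.tar.gz/rf_mcp-0.1.0.dev10/src/robotmcp/components/test_builder.py | _categorize_step
-- ===== SOURCE A (Python) =====
-- def _categorize_step(keyword: str) -> str:
--     """Categorize a step by its type."""
--     keyword_lower = keyword.lower()
--
--     if any(kw in keyword_lower for kw in ['open', 'go to', 'navigate']):
--         return "navigation"
--     elif any(kw in keyword_lower for kw in ['click', 'press', 'select']):
--         return "interaction"
--     elif any(kw in keyword_lower for kw in ['input', 'type', 'enter', 'fill']):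
--         return "input"
--     elif any(kw in keyword_lower for kw in ['should', 'verify', 'assert', 'check']):
--         return "verification"
--     elif any(kw in keyword_lower for kw in ['wait', 'sleep', 'pause']):
--         return "synchronization"
--     elif any(kw in keyword_lower for kw in ['close', 'quit', 'cleanup']):
--         return "cleanup"
--     else:
--         return "other"
-- ===== SOURCE B (Python) =====
-- _CATEGORIES = ("navigation", "interaction", "input", "verification",
--                "synchronization", "cleanup")
--
-- _PATTERNS = {
--     "open": 0, "go to": 0, "navigate": 0,
--     "click": 1, "press": 1, "select": 1,
--     "input": 2, "type": 2, "enter": 2, "fill": 2,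
--     "should": 3, "verify": 3, "assert": 3, "check": 3,
--     "wait": 4, "sleep": 4, "pause": 4,
--     "close": 5, "quit": 5, "cleanup": 5,
-- }
--
--
-- def _categorize_step(keyword: str) -> str:
--     """Categorize a step: single left-to-right scan of the lowered string,
--     keeping the minimum priority of any pattern that starts at the current
--     position; no per-category containment tests."""
--     s = keyword.lower()
--     best = len(_CATEGORIES)
--     for i in range(len(s)):
--         for pat, prio in _PATTERNS.items():
--             if prio < best and s.startswith(pat, i):
--                 best = prio
--     return _CATEGORIES[best] if best < len(_CATEGORIES) else "other"
-- ===== Notes on version B (the rewrite author's own statement) =====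
-- stated objective: alternative
-- what changed: Instead of a priority-ordered chain of whole-string containment tests, B makes one position-major scan of the lowered string, testing every pattern at each position and keeping the minimum category priority matched, then maps that priority to its category name.
import Mathlib
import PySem

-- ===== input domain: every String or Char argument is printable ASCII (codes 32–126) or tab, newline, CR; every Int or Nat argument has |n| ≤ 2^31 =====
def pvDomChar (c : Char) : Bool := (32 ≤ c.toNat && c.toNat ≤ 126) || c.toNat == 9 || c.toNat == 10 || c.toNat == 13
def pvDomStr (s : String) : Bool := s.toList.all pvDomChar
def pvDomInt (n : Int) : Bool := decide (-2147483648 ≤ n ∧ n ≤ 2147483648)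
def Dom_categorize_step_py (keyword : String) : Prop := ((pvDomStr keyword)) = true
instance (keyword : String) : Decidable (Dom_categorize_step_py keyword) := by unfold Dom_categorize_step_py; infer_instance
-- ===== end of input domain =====

-- B replaces A's priority-ordered chain of containment tests by one position-major
-- scan of the lowered string keeping the minimum matched category priority; same values.

-- ===== PORT A =====
def categorize_step_py (keyword : String) : String :=
  let keyword_lower := PySem.Str.lower keyword
  if ["open", "go to", "navigate"].any (fun kw => PySem.Str.isIn kw keyword_lower) then "navigation"
  else if ["click", "press", "select"].any (fun kw => PySem.Str.isIn kw keyword_lower) then "interaction"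
  else if ["input", "type", "enter", "fill"].any (fun kw => PySem.Str.isIn kw keyword_lower) then "input"
  else if ["should", "verify", "assert", "check"].any (fun kw => PySem.Str.isIn kw keyword_lower) then "verification"
  else if ["wait", "sleep", "pause"].any (fun kw => PySem.Str.isIn kw keyword_lower) then "synchronization"
  else if ["close", "quit", "cleanup"].any (fun kw => PySem.Str.isIn kw keyword_lower) then "cleanup"
  else "other"

-- ===== PORT B =====
-- _CATEGORIES
def pvCats : List String :=
  ["navigation", "interaction", "input", "verification", "synchronization", "cleanup"]

-- _PATTERNS (a dict with distinct keys: an association list in insertion order)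
def pvPatterns : List (String × Nat) :=
  [("open", 0), ("go to", 0), ("navigate", 0),
   ("click", 1), ("press", 1), ("select", 1),
   ("input", 2), ("type", 2), ("enter", 2), ("fill", 2),
   ("should", 3), ("verify", 3), ("assert", 3), ("check", 3),
   ("wait", 4), ("sleep", 4), ("pause", 4),
   ("close", 5), ("quit", 5), ("cleanup", 5)]

-- the inner 'for pat, prio in _PATTERNS.items()' loop at position i;
-- s.startswith(pat, i) with 0 ≤ i is exactly: pat is a prefix of s.drop i
def pvInner (cs : List Char) (i : Nat) (b : Nat) : Nat :=
  pvPatterns.foldl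
    (fun b pp =>
      if pp.2 < b && PySem.Chars.startswith (cs.drop i) pp.1.toList then pp.2 else b)
    b

def categorize_step_py_alt (keyword : String) : String :=
  let s := PySem.Str.lower keyword
  -- 'for i in range(len(s))': indices 0 .. len(s)-1 (len(s) ≥ 0, so a Nat range is exact)
  let best := (List.range s.toList.length).foldl (fun b i => pvInner s.toList i b) 6
  if best < 6 then pvCats.getD best "other" else "other"

-- ===== PRECONDITION & SPEC =====
def Spec_categorize_step_py (keyword : String) (out : String) : Prop := out = categorize_step_py_alt keyword
instance (keyword : String) (out : String) : Decidable (Spec_categorize_step_py keyword out) := by unfold Spec_categorize_step_py; infer_instance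

-- ===== CLAIM (what is proved, stated in full; the proofs are below) =====
def Claim_equal_categorize_step_py : Prop := ∀ (keyword : String), Dom_categorize_step_py keyword → Spec_categorize_step_py keyword (categorize_step_py keyword)

-- ===== LEMMAS AND PROOFS =====

-- generic facts about the min-priority fold, proved over an arbitrary pattern list
def pvInnerGo (cs : List Char) (i : Nat) (ps : List (String × Nat)) (b : Nat) : Nat :=
  ps.foldl
    (fun b pp =>
      if pp.2 < b && PySem.Chars.startswith (cs.drop i) pp.1.toList then pp.2 else b)
    b

theorem pvInner_eq (cs : List Char) (i b : Nat) : pvInner cs i b = pvInnerGo cs i pvPatterns b := rfl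

theorem pvInnerGo_le (cs : List Char) (i : Nat) (ps : List (String × Nat)) (b : Nat) :
    pvInnerGo cs i ps b ≤ b := by
  induction ps generalizing b with
  | nil => simp [pvInnerGo]
  | cons pp rest ih =>
    simp only [pvInnerGo, List.foldl_cons]
    split_ifs with h
    · exact le_trans (ih pp.2) (by simp at h; omega)
    · exact ih b

theorem pvInnerGo_le_of_match (cs : List Char) (i : Nat) (ps : List (String × Nat)) (b : Nat)
    (pp : String × Nat) (hmem : pp ∈ ps)
    (hm : PySem.Chars.startswith (cs.drop i) pp.1.toList = true) :
    pvInnerGo cs i ps b ≤ pp.2 := by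
  induction ps generalizing b with
  | nil => cases hmem
  | cons q rest ih =>
    rcases List.mem_cons.mp hmem with hq | hmem
    · subst hq
      simp only [pvInnerGo, List.foldl_cons, hm, Bool.and_true]
      split_ifs with h
      · exact pvInnerGo_le cs i rest pp.2
      · exact le_trans (pvInnerGo_le cs i rest b) (by simpa using h)
    · simp only [pvInnerGo, List.foldl_cons]
      split_ifs <;> exact ih _ hmem
  
theorem pvInnerGo_cases (cs : List Char) (i : Nat) (ps : List (String × Nat)) (b : Nat) :
    pvInnerGo cs i ps b = b ∨
      ∃ pp ∈ ps, PySem.Chars.startswith (cs.drop i) pp.1.toList = true ∧ pvInnerGo cs i ps b = pp.2 := by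
  induction ps generalizing b with
  | nil => exact Or.inl rfl
  | cons q rest ih =>
    simp only [pvInnerGo, List.foldl_cons]
    split_ifs with h
    · right
      rcases ih q.2 with h1 | ⟨pp, hmem, hm, hval⟩
      · exact ⟨q, List.mem_cons_self .., by simp at h; exact ⟨h.2, h1⟩⟩
      · exact ⟨pp, List.mem_cons_of_mem _ hmem, hm, hval⟩
    · rcases ih b with h1 | ⟨pp, hmem, hm, hval⟩
      · exact Or.inl h1
      · exact Or.inr ⟨pp, List.mem_cons_of_mem _ hmem, hm, hval⟩

-- the outer 'for i in range(len(s))' fold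
theorem pvBest_le (cs : List Char) (l : List Nat) (b : Nat) :
    l.foldl (fun b i => pvInner cs i b) b ≤ b := by
  induction l generalizing b with
  | nil => simp
  | cons i rest ih =>
    simp only [List.foldl_cons]
    exact le_trans (ih _) (by rw [pvInner_eq]; exact pvInnerGo_le cs i pvPatterns b)

theorem pvBest_le_of_match (cs : List Char) (l : List Nat) (b : Nat)
    (i : Nat) (hi : i ∈ l) (pp : String × Nat) (hmem : pp ∈ pvPatterns)
    (hm : PySem.Chars.startswith (cs.drop i) pp.1.toList = true) :
    l.foldl (fun b i => pvInner cs i b) b ≤ pp.2 := by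
  induction l generalizing b with
  | nil => cases hi
  | cons j rest ih =>
    rcases List.mem_cons.mp hi with hj | hi
    · subst hj
      simp only [List.foldl_cons]
      exact le_trans (pvBest_le cs rest _) (by rw [pvInner_eq]; exact pvInnerGo_le_of_match cs i pvPatterns b pp hmem hm)
    · simp only [List.foldl_cons]
      exact ih _ hi

theorem pvBest_cases (cs : List Char) (l : List Nat) (b : Nat) :
    l.foldl (fun b i => pvInner cs i b) b = b ∨
      ∃ i ∈ l, ∃ pp ∈ pvPatterns, PySem.Chars.startswith (cs.drop i) pp.1.toList = true ∧
        l.foldl (fun b i => pvInner cs i b) b = pp.2 := by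
  induction l generalizing b with
  | nil => exact Or.inl rfl
  | cons j rest ih =>
    simp only [List.foldl_cons]
    rcases ih (pvInner cs j b) with h1 | ⟨i, hi, pp, hmem, hm, hval⟩
    · rw [h1, pvInner_eq]
      rcases pvInnerGo_cases cs j pvPatterns b with h2 | ⟨pp, hmem, hm, hval⟩
      · exact Or.inl h2
      · exact Or.inr ⟨j, List.mem_cons_self .., pp, hmem, hm, hval⟩
    · exact Or.inr ⟨i, List.mem_cons_of_mem _ hi, pp, hmem, hm, hval⟩

-- bridge: containment of a nonempty pattern ⇔ it starts at some scanned position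
theorem pv_isIn_of_startswith (cs pat : List Char) (i : Nat)
    (hm : PySem.Chars.startswith (cs.drop i) pat = true) :
    PySem.Chars.isIn pat cs = true := by
  rw [← PySem.Chars.exists_prefix_drop_iff_isIn]
  exact ⟨i, (PySem.Chars.startswith_iff _ _).mp hm⟩

theorem pv_startswith_of_isIn (cs pat : List Char) (hne : pat ≠ [])
    (h : PySem.Chars.isIn pat cs = true) :
    ∃ i ∈ List.range cs.length, PySem.Chars.startswith (cs.drop i) pat = true := by
  rw [← PySem.Chars.exists_prefix_drop_iff_isIn] at h
  obtain ⟨j, hj⟩ := h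
  refine ⟨j, ?_, (PySem.Chars.startswith_iff _ _).mpr hj⟩
  rw [List.mem_range]
  by_contra hge
  push Not at hge
  rw [List.drop_eq_nil_of_le hge] at hj
  exact hne (List.prefix_nil.mp hj)

-- every pattern of pvPatterns is nonempty, and its priority names its category list
theorem pvPatterns_sound (pp : String × Nat) (hmem : pp ∈ pvPatterns) :
    pp.1.toList ≠ [] ∧
    ((pp.2 = 0 ∧ pp.1 ∈ ["open", "go to", "navigate"]) ∨
     (pp.2 = 1 ∧ pp.1 ∈ ["click", "press", "select"]) ∨
     (pp.2 = 2 ∧ pp.1 ∈ ["input", "type", "enter", "fill"]) ∨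
     (pp.2 = 3 ∧ pp.1 ∈ ["should", "verify", "assert", "check"]) ∨
     (pp.2 = 4 ∧ pp.1 ∈ ["wait", "sleep", "pause"]) ∨
     (pp.2 = 5 ∧ pp.1 ∈ ["close", "quit", "cleanup"])) := by
  fin_cases hmem <;> decide

-- the overall min-priority accumulator of B, on the lowered character list
def pvM (cs : List Char) : Nat :=
  (List.range cs.length).foldl (fun b i => pvInner cs i b) 6

theorem pvM_le6 (cs : List Char) : pvM cs ≤ 6 := pvBest_le cs _ 6

theorem pvM_le (cs : List Char) (pat : String) (k : Nat)
    (hmem : (pat, k) ∈ pvPatterns) (hIn : PySem.Chars.isIn pat.toList cs = true) :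
    pvM cs ≤ k := by
  obtain ⟨hne, -⟩ := pvPatterns_sound (pat, k) hmem
  obtain ⟨i, hi, hm⟩ := pv_startswith_of_isIn cs pat.toList hne hIn
  exact pvBest_le_of_match cs _ 6 i hi (pat, k) hmem hm

theorem pvM_cases (cs : List Char) :
    pvM cs = 6 ∨ ∃ pp ∈ pvPatterns, PySem.Chars.isIn pp.1.toList cs = true ∧ pvM cs = pp.2 := by
  rcases pvBest_cases cs (List.range cs.length) 6 with h | ⟨i, _, pp, hmem, hm, hval⟩
  · exact Or.inl h
  · exact Or.inr ⟨pp, hmem, pv_isIn_of_startswith cs pp.1.toList i hm, hval⟩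

-- the six chain conditions of A, indexed by priority
def pvCond (j : Nat) (cs : List Char) : Bool :=
  match j with
  | 0 => PySem.Chars.isIn "open".toList cs || (PySem.Chars.isIn "go to".toList cs || PySem.Chars.isIn "navigate".toList cs)
  | 1 => PySem.Chars.isIn "click".toList cs || (PySem.Chars.isIn "press".toList cs || PySem.Chars.isIn "select".toList cs)
  | 2 => PySem.Chars.isIn "input".toList cs || (PySem.Chars.isIn "type".toList cs || (PySem.Chars.isIn "enter".toList cs || PySem.Chars.isIn "fill".toList cs))
  | 3 => PySem.Chars.isIn "should".toList cs || (PySem.Chars.isIn "verify".toList cs || (PySem.Chars.isIn "assert".toList cs || PySem.Chars.isIn "check".toList cs))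
  | 4 => PySem.Chars.isIn "wait".toList cs || (PySem.Chars.isIn "sleep".toList cs || PySem.Chars.isIn "pause".toList cs)
  | 5 => PySem.Chars.isIn "close".toList cs || (PySem.Chars.isIn "quit".toList cs || PySem.Chars.isIn "cleanup".toList cs)
  | _ => false

theorem pv_match_cond (cs : List Char) (pp : String × Nat) (hmem : pp ∈ pvPatterns)
    (hIn : PySem.Chars.isIn pp.1.toList cs = true) : pvCond pp.2 cs = true := by
  fin_cases hmem <;> (simp at hIn; simp [pvCond, hIn])

theorem pv_cond_le (cs : List Char) (k : Nat) (h : pvCond k cs = true) : pvM cs ≤ k := by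
  match k with
  | 0 =>
    simp only [pvCond, Bool.or_eq_true] at h
    rcases h with h | h | h
    exacts [pvM_le cs "open" 0 (by decide) h, pvM_le cs "go to" 0 (by decide) h,
            pvM_le cs "navigate" 0 (by decide) h]
  | 1 =>
    simp only [pvCond, Bool.or_eq_true] at h
    rcases h with h | h | h
    exacts [pvM_le cs "click" 1 (by decide) h, pvM_le cs "press" 1 (by decide) h,
            pvM_le cs "select" 1 (by decide) h]
  | 2 =>
    simp only [pvCond, Bool.or_eq_true] at h
    rcases h with h | h | h | h
    exacts [pvM_le cs "input" 2 (by decide) h, pvM_le cs "type" 2 (by decide) h,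
            pvM_le cs "enter" 2 (by decide) h, pvM_le cs "fill" 2 (by decide) h]
  | 3 =>
    simp only [pvCond, Bool.or_eq_true] at h
    rcases h with h | h | h | h
    exacts [pvM_le cs "should" 3 (by decide) h, pvM_le cs "verify" 3 (by decide) h,
            pvM_le cs "assert" 3 (by decide) h, pvM_le cs "check" 3 (by decide) h]
  | 4 =>
    simp only [pvCond, Bool.or_eq_true] at h
    rcases h with h | h | h
    exacts [pvM_le cs "wait" 4 (by decide) h, pvM_le cs "sleep" 4 (by decide) h,
            pvM_le cs "pause" 4 (by decide) h]
  | 5 =>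
    simp only [pvCond, Bool.or_eq_true] at h
    rcases h with h | h | h
    exacts [pvM_le cs "close" 5 (by decide) h, pvM_le cs "quit" 5 (by decide) h,
            pvM_le cs "cleanup" 5 (by decide) h]
  | (n + 6) => simp [pvCond] at h

theorem pv_lb (cs : List Char) (k : Nat) (hk : k ≤ 6)
    (hno : ∀ j < k, pvCond j cs = false) : k ≤ pvM cs := by
  rcases pvM_cases cs with h | ⟨pp, hmem, hIn, hval⟩
  · omega
  · by_contra hlt
    push Not at hlt
    have hc := pv_match_cond cs pp hmem hIn
    rw [hno pp.2 (by omega)] at hc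
    exact Bool.false_ne_true hc

-- ===== VERDICT (by name: the statement is the Claim_ definition above) =====
theorem categorize_step_py_spec : Claim_equal_categorize_step_py := by
  intro keyword _
  show categorize_step_py keyword = categorize_step_py_alt keyword
  simp only [categorize_step_py, categorize_step_py_alt, List.any_cons, List.any_nil,
    Bool.or_false, PySem.Str.isIn_eq, PySem.Str.toList_lower]
  generalize PySem.Chars.lower keyword.toList = cs
  show (if pvCond 0 cs = true then "navigation"
        else if pvCond 1 cs = true then "interaction"
        else if pvCond 2 cs = true then "input"
        else if pvCond 3 cs = true then "verification"
        else if pvCond 4 cs = true then "synchronization"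
        else if pvCond 5 cs = true then "cleanup"
        else "other") =
      (if pvM cs < 6 then pvCats.getD (pvM cs) "other" else "other")
  by_cases h0 : pvCond 0 cs = true
  · rw [if_pos h0, Nat.le_zero.mp (pv_cond_le cs 0 h0)]; rfl
  rw [if_neg h0, Bool.not_eq_true] at *
  by_cases h1 : pvCond 1 cs = true
  · have hM : pvM cs = 1 := le_antisymm (pv_cond_le cs 1 h1)
      (pv_lb cs 1 (by omega) (by intro j hj; interval_cases j; exact h0))
    rw [if_pos h1, hM]; rfl
  rw [if_neg h1, Bool.not_eq_true] at *
  by_cases h2 : pvCond 2 cs = true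
  · have hM : pvM cs = 2 := le_antisymm (pv_cond_le cs 2 h2)
      (pv_lb cs 2 (by omega) (by intro j hj; interval_cases j; exacts [h0, h1]))
    rw [if_pos h2, hM]; rfl
  rw [if_neg h2, Bool.not_eq_true] at *
  by_cases h3 : pvCond 3 cs = true
  · have hM : pvM cs = 3 := le_antisymm (pv_cond_le cs 3 h3)
      (pv_lb cs 3 (by omega) (by intro j hj; interval_cases j; exacts [h0, h1, h2]))
    rw [if_pos h3, hM]; rfl
  rw [if_neg h3, Bool.not_eq_true] at *
  by_cases h4 : pvCond 4 cs = true
  · have hM : pvM cs = 4 := le_antisymm (pv_cond_le cs 4 h4)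
      (pv_lb cs 4 (by omega) (by intro j hj; interval_cases j; exacts [h0, h1, h2, h3]))
    rw [if_pos h4, hM]; rfl
  rw [if_neg h4, Bool.not_eq_true] at *
  by_cases h5 : pvCond 5 cs = true
  · have hM : pvM cs = 5 := le_antisymm (pv_cond_le cs 5 h5)
      (pv_lb cs 5 (by omega) (by intro j hj; interval_cases j; exacts [h0, h1, h2, h3, h4]))
    rw [if_pos h5, hM]; rfl
  rw [if_neg h5, Bool.not_eq_true] at *
  have hM : pvM cs = 6 := le_antisymm (pvM_le6 cs)
    (pv_lb cs 6 le_rfl (by intro j hj; interval_cases j; exacts [h0, h1, h2, h3, h4, h5]))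
  rw [hM]; rfl
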